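-- pv_equiv track=rewrite | github.com/yordiyes/DSA-with-python | leet code problems solution/contestOne.py | game_score
-- ===== SOURCE A (Python) =====
-- def game_score(n, cards):
--     sereja_score = 0
--     dima_score = 0
--
--     left = 0
--     right = n - 1
--
--     for _ in range(n):
--         if cards[left] > cards[right]:
--             sereja_score += cards[left]
--             left += 1
--         else:
--             sereja_score += cards[right]
--             right -= 1
--
--         if left > right:
--             break
--
--         if cards[left] > cards[right]:
--             dima_score += cards[left]
--             left += 1
--         else:
--             dima_score += cards[right]
--             right -= 1
--
--         if left > right:
--             break
--
--     return sereja_score, dima_score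
-- ===== SOURCE B (Python) =====
-- def game_score(n, cards):
--     # stage 1: the sequence of cards taken, in play order (ties take the right end)
--     lo, hi = 0, n - 1
--     picks = []
--     while lo <= hi:
--         if cards[lo] > cards[hi]:
--             picks.append(cards[lo])
--             lo += 1
--         else:
--             picks.append(cards[hi])
--             hi -= 1
--     # stage 2: fold the picks back-to-front, swapping (mover, opponent) each card
--     mover, opp = 0, 0
--     for x in reversed(picks):
--         mover, opp = opp + x, mover
--     return mover, opp
-- ===== Notes on version B (the rewrite author's own statement) =====
-- stated objective: alternative
-- what changed: A interleaves both players' accumulators in one unrolled two-picks-per-iteration loop with break checks; B first materialises the sequence of picked cards, then derives both totals by a single back-to-front fold that swaps a (mover, opponent) pair per card, with no turn bookkeeping.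
import Mathlib
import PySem

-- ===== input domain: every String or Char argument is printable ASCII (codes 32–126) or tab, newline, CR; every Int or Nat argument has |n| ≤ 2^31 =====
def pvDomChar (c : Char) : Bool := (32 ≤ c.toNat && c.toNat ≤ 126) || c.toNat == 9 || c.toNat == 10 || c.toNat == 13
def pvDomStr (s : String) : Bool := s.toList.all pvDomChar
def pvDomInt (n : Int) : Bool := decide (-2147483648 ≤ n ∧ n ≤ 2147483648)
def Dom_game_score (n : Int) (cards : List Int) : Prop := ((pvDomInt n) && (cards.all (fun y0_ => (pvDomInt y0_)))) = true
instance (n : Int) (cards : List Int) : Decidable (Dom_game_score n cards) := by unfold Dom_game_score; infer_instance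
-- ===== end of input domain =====

-- B replaces A's interleaved two-accumulator unrolled loop by two stages: build the
-- sequence of picked cards, then a back-to-front fold swapping (mover, opponent);
-- same return value, no speed claim.

-- ===== PORT A =====
-- A's `for _ in range(n)` loop: each iteration does Sereja's pick, a break check,
-- Dima's pick, a second break check. Indices are read with pyGet? (in range under Pre_;
-- `.getD 0` is never hit there).
def gameLoopA (cards : List Int) : Nat → Int → Int → Int → Int → Int × Int
  | 0, s, d, _, _ => (s, d)
  | Nat.succ k, s, d, l, r =>
    if (PySem.List.pyGet? cards l).getD 0 > (PySem.List.pyGet? cards r).getD 0 then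
      if l + 1 > r then (s + (PySem.List.pyGet? cards l).getD 0, d)
      else
        if (PySem.List.pyGet? cards (l + 1)).getD 0 > (PySem.List.pyGet? cards r).getD 0 then
          if l + 2 > r then
            (s + (PySem.List.pyGet? cards l).getD 0, d + (PySem.List.pyGet? cards (l + 1)).getD 0)
          else
            gameLoopA cards k (s + (PySem.List.pyGet? cards l).getD 0)
              (d + (PySem.List.pyGet? cards (l + 1)).getD 0) (l + 2) r
        else
          if l + 1 > r - 1 then
            (s + (PySem.List.pyGet? cards l).getD 0, d + (PySem.List.pyGet? cards r).getD 0)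
          else
            gameLoopA cards k (s + (PySem.List.pyGet? cards l).getD 0)
              (d + (PySem.List.pyGet? cards r).getD 0) (l + 1) (r - 1)
    else
      if l > r - 1 then (s + (PySem.List.pyGet? cards r).getD 0, d)
      else
        if (PySem.List.pyGet? cards l).getD 0 > (PySem.List.pyGet? cards (r - 1)).getD 0 then
          if l + 1 > r - 1 then
            (s + (PySem.List.pyGet? cards r).getD 0, d + (PySem.List.pyGet? cards l).getD 0)
          else
            gameLoopA cards k (s + (PySem.List.pyGet? cards r).getD 0)
              (d + (PySem.List.pyGet? cards l).getD 0) (l + 1) (r - 1)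
        else
          if l > r - 2 then
            (s + (PySem.List.pyGet? cards r).getD 0, d + (PySem.List.pyGet? cards (r - 1)).getD 0)
          else
            gameLoopA cards k (s + (PySem.List.pyGet? cards r).getD 0)
              (d + (PySem.List.pyGet? cards (r - 1)).getD 0) l (r - 2)

def game_score (n : Int) (cards : List Int) : Int × Int :=
  gameLoopA cards n.toNat 0 0 0 (n - 1)

-- ===== PORT B =====
-- Stage 1 of Source B: the `while lo <= hi` loop building `picks`, the cards in take order.
def pickSeq (cards : List Int) (lo hi : Int) : List Int :=
  if _h : lo ≤ hi then
    if (PySem.List.pyGet? cards lo).getD 0 > (PySem.List.pyGet? cards hi).getD 0 then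
      (PySem.List.pyGet? cards lo).getD 0 :: pickSeq cards (lo + 1) hi
    else
      (PySem.List.pyGet? cards hi).getD 0 :: pickSeq cards lo (hi - 1)
  else []
termination_by (hi + 1 - lo).toNat
decreasing_by all_goals omega

-- Stage 2 of Source B: `for x in reversed(picks): mover, opp = opp + x, mover`.
def game_score_alt (n : Int) (cards : List Int) : Int × Int :=
  (pickSeq cards 0 (n - 1)).reverse.foldl (fun (p : Int × Int) x => (p.2 + x, p.1)) (0, 0)

-- ===== PRECONDITION & SPEC =====
-- Pre_ excludes exactly the inputs where the Python A raises IndexError (n > len(cards));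
-- B raises there too.
def Pre_game_score (n : Int) (cards : List Int) : Prop := n ≤ (cards.length : Int)
instance (n : Int) (cards : List Int) : Decidable (Pre_game_score n cards) := by
  unfold Pre_game_score; infer_instance
def pvWitness_game_score : Int × List Int := (3, [1, 2, 3])
def Spec_game_score (n : Int) (cards : List Int) (out : Int × Int) : Prop := out = game_score_alt n cards
instance (n : Int) (cards : List Int) (out : Int × Int) : Decidable (Spec_game_score n cards out) := by unfold Spec_game_score; infer_instance

-- ===== CLAIM (what is proved, stated in full; the proofs are below) =====
def Claim_equal_game_score : Prop := ∀ (n : Int) (cards : List Int), Dom_game_score n cards → Pre_game_score n cards → Spec_game_score n cards (game_score n cards)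

-- ===== LEMMAS AND PROOFS =====

-- The swap-fold over the picks, written as a foldr (= Source B's reversed-foldl).
def playOf : List Int → Int × Int :=
  List.foldr (fun x p => (p.2 + x, p.1)) (0, 0)

theorem game_score_alt_eq_playOf (n : Int) (cards : List Int) :
    game_score_alt n cards = playOf (pickSeq cards 0 (n - 1)) := by
  unfold game_score_alt playOf
  rw [List.foldl_reverse]

theorem playOf_nil : playOf [] = (0, 0) := rfl
theorem playOf_cons (x : Int) (l : List Int) :
    playOf (x :: l) = ((playOf l).2 + x, (playOf l).1) := rfl

-- One iteration of A's loop (two picks with break checks) equals two unfoldings of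
-- the pick sequence under the swap-fold.
theorem loop_eq (cards : List Int) (fuel : Nat) :
    ∀ s d l r : Int, r + 1 - l ≤ 2 * (fuel : Int) → (l ≤ r ∨ fuel = 0) →
      gameLoopA cards fuel s d l r =
        (s + (playOf (pickSeq cards l r)).1, d + (playOf (pickSeq cards l r)).2) := by
  induction fuel with
  | zero =>
    intro s d l r h1 _
    rw [pickSeq, dif_neg (by omega : ¬ l ≤ r)]
    simp [gameLoopA, playOf_nil]
  | succ k ih =>
    intro s d l r h1 h2
    have hlr : l ≤ r := h2.resolve_right (by omega)
    simp only [gameLoopA]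
    rw [pickSeq, dif_pos hlr]
    by_cases hc : (PySem.List.pyGet? cards l).getD 0 > (PySem.List.pyGet? cards r).getD 0
    · rw [if_pos hc, if_pos hc, playOf_cons]
      by_cases h3 : l + 1 > r
      · rw [if_pos h3, pickSeq, dif_neg (by omega : ¬ l + 1 ≤ r)]
        simp [playOf_nil]
      · rw [if_neg h3, pickSeq, dif_pos (by omega : l + 1 ≤ r)]
        by_cases hc2 : (PySem.List.pyGet? cards (l + 1)).getD 0 > (PySem.List.pyGet? cards r).getD 0
        · rw [if_pos hc2, if_pos hc2, playOf_cons]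
          by_cases h4 : l + 2 > r
          · rw [if_pos h4, show l + 1 + 1 = l + 2 from by ring,
              pickSeq, dif_neg (by omega : ¬ l + 2 ≤ r)]
            simp only [playOf_nil]
            simp only [Prod.mk.injEq]; constructor <;> ring
          · rw [if_neg h4, show l + 1 + 1 = l + 2 from by ring]
            rw [ih _ _ (l + 2) r (by push_cast at h1 ⊢; omega) (Or.inl (by omega))]
            simp only [Prod.mk.injEq]; constructor <;> ring
        · rw [if_neg hc2, if_neg hc2, playOf_cons]
          by_cases h4 : l + 1 > r - 1
          · rw [if_pos h4, pickSeq, dif_neg (by omega : ¬ l + 1 ≤ r - 1)]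
            simp only [playOf_nil]
            simp only [Prod.mk.injEq]; constructor <;> ring
          · rw [if_neg h4]
            rw [ih _ _ (l + 1) (r - 1) (by push_cast at h1 ⊢; omega) (Or.inl (by omega))]
            simp only [Prod.mk.injEq]; constructor <;> ring
    · rw [if_neg hc, if_neg hc, playOf_cons]
      by_cases h3 : l > r - 1
      · rw [if_pos h3, pickSeq, dif_neg (by omega : ¬ l ≤ r - 1)]
        simp [playOf_nil]
      · rw [if_neg h3, pickSeq, dif_pos (by omega : l ≤ r - 1)]
        by_cases hc2 : (PySem.List.pyGet? cards l).getD 0 > (PySem.List.pyGet? cards (r - 1)).getD 0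
        · rw [if_pos hc2, if_pos hc2, playOf_cons]
          by_cases h4 : l + 1 > r - 1
          · rw [if_pos h4, pickSeq, dif_neg (by omega : ¬ l + 1 ≤ r - 1)]
            simp only [playOf_nil]
            simp only [Prod.mk.injEq]; constructor <;> ring
          · rw [if_neg h4]
            rw [ih _ _ (l + 1) (r - 1) (by push_cast at h1 ⊢; omega) (Or.inl (by omega))]
            simp only [Prod.mk.injEq]; constructor <;> ring
        · rw [if_neg hc2, if_neg hc2, playOf_cons]
          by_cases h4 : l > r - 2
          · rw [if_pos h4, show r - 1 - 1 = r - 2 from by ring,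
              pickSeq, dif_neg (by omega : ¬ l ≤ r - 2)]
            simp only [playOf_nil]
            simp only [Prod.mk.injEq]; constructor <;> ring
          · rw [if_neg h4, show r - 1 - 1 = r - 2 from by ring]
            rw [ih _ _ l (r - 2) (by push_cast at h1 ⊢; omega) (Or.inl (by omega))]
            simp only [Prod.mk.injEq]; constructor <;> ring

-- ===== VERDICT (by name: the statement is the Claim_ definition above) =====
theorem game_score_spec : Claim_equal_game_score := by
  intro n cards _ _
  unfold Spec_game_score game_score
  rw [game_score_alt_eq_playOf]
  rw [loop_eq cards n.toNat 0 0 0 (n - 1) (by omega) (by omega)]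
  simp
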